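-- pv_equiv track=rewrite | github.com/pqnguyen/CompetitiveProgramming | glassdoor/grab/ArrayPartition.py | solution
-- ===== SOURCE A (Python) =====
-- def solution(a):
--     min_a, max_a = a[:], a[:]
--     for i in range(1, len(a)):
--         max_a[i] = max(a[i], max_a[i - 1])
--
--     for i in range(len(a) - 2, -1, -1):
--         min_a[i] = min(a[i], min_a[i + 1])
--
--     res = len(a)
--     for i in range(len(a) - 1):
--         if max_a[i] < min_a[i + 1]:
--             res = i + 1
--             break
--     return res
-- ===== SOURCE B (Python) =====
-- def solution(a):
--     if not a:
--         return 0
--     left_max = cur_max = a[0]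
--     length = 1
--     for i in range(1, len(a)):
--         cur_max = max(cur_max, a[i])
--         if a[i] <= left_max:
--             length = i + 1
--             left_max = cur_max
--     return length
-- ===== Notes on version B (the rewrite author's own statement) =====
-- stated objective: simpler
-- what changed: Replaces A's two O(n) auxiliary tables (prefix-max and suffix-min lists, built by copying and updating) plus a third scan by a single left-to-right greedy pass keeping only O(1) state (current max, max of the committed prefix, partition length); no list copies or writes.
import Mathlib
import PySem

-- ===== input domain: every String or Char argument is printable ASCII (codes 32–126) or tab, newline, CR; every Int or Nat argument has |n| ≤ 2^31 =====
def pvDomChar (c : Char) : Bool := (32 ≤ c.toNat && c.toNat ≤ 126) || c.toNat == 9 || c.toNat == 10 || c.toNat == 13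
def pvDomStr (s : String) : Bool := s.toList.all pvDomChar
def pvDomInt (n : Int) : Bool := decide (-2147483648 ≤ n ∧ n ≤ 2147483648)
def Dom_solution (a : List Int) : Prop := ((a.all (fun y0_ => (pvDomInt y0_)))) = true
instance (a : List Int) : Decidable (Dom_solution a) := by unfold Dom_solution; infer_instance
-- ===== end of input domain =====

-- B replaces A's prefix-max and suffix-min tables plus a final scan by one greedy pass with O(1) state; same O(n) time, return values proved equal.

-- ===== PORT A =====
-- first loop of A: max_a[i] = max(a[i], max_a[i-1]) for i = 1 .. n-1 (fuel = remaining iterations;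
-- every index the Python touches is in range, so List.getD is exact here)
def pvBuildMax (a : List Int) (m : List Int) (i : Nat) : Nat → List Int
  | 0 => m
  | fuel+1 => pvBuildMax a (m.set i (max (a.getD i 0) (m.getD (i-1) 0))) (i+1) fuel

-- second loop of A: min_a[i] = min(a[i], min_a[i+1]) for i = k-1 down to 0
def pvBuildMin (a : List Int) (m : List Int) : Nat → List Int
  | 0 => m
  | k+1 => pvBuildMin a (m.set k (min (a.getD k 0) (m.getD (k+1) 0))) k

-- third loop of A, with break: first i with max_a[i] < min_a[i+1] yields i+1, else res
def pvScan (mx mn : List Int) (i : Nat) (res : Int) : Nat → Int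
  | 0 => res
  | fuel+1 => if mx.getD i 0 < mn.getD (i+1) 0 then (i:Int)+1 else pvScan mx mn (i+1) res fuel

def solution (a : List Int) : Int :=
  let n := a.length
  let max_a := pvBuildMax a a 1 (n-1)
  let min_a := pvBuildMin a a (n-1)
  pvScan max_a min_a 0 (n:Int) (n-1)

-- ===== PORT B =====
-- B's loop: for i = 1 .. n-1: cur_max = max(cur_max, a[i]); if a[i] <= left_max: length = i+1; left_max = cur_max
def pvGo (a : List Int) (leftMax curMax length : Int) (i : Nat) : Nat → Int
  | 0 => length
  | fuel+1 =>
    let x := a.getD i 0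
    let c := max curMax x
    if x ≤ leftMax then pvGo a c c ((i:Int)+1) (i+1) fuel
    else pvGo a leftMax c length (i+1) fuel

def solution_alt (a : List Int) : Int :=
  if a = [] then 0
  else pvGo a (a.getD 0 0) (a.getD 0 0) 1 1 (a.length - 1)

-- ===== PRECONDITION & SPEC =====
def Spec_solution (a : List Int) (out : Int) : Prop := out = solution_alt a
instance (a : List Int) (out : Int) : Decidable (Spec_solution a out) := by unfold Spec_solution; infer_instance

-- ===== CLAIM (what is proved, stated in full; the proofs are below) =====
def Claim_equal_solution : Prop := ∀ (a : List Int), Dom_solution a → Spec_solution a (solution a)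

-- ===== LEMMAS AND PROOFS =====

-- prefix maximum of a[0..i]
def pvPM (a : List Int) : Nat → Int
  | 0 => a.getD 0 0
  | i+1 => max (a.getD (i+1) 0) (pvPM a i)

-- suffix minimum of a[i..i+fuel]
def pvSM (a : List Int) (i : Nat) : Nat → Int
  | 0 => a.getD i 0
  | f+1 => min (a.getD i 0) (pvSM a (i+1) f)

-- "L is a correct answer": valid split and no smaller valid split
def pvGood (a : List Int) (L : Nat) : Prop :=
  1 ≤ L ∧ L ≤ a.length ∧
  (∀ j, L ≤ j → j < a.length → pvPM a (L-1) < a.getD j 0) ∧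
  (∀ k, 1 ≤ k → k < L → ∃ j, k ≤ j ∧ j < a.length ∧ a.getD j 0 ≤ pvPM a (k-1))

theorem pvPM_mono (a : List Int) {i j : Nat} (h : i ≤ j) : pvPM a i ≤ pvPM a j := by
  induction j with
  | zero => simp_all
  | succ j ih =>
    rcases Nat.lt_or_ge i (j+1) with h' | h'
    · exact le_trans (ih (by omega)) (le_max_right _ _)
    · have : i = j+1 := by omega
      subst this; rfl

theorem pvGood_unique_lt (a : List Int) {L1 L2 : Nat} (h : L1 < L2)
    (g1 : pvGood a L1) (g2 : pvGood a L2) : False := by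
  obtain ⟨h1, -, v1, -⟩ := g1
  obtain ⟨-, -, -, m2⟩ := g2
  obtain ⟨j, hkj, hjn, hle⟩ := m2 L1 h1 h
  exact absurd hle (not_le.mpr (v1 j hkj hjn))

theorem pvGood_unique (a : List Int) {L1 L2 : Nat}
    (g1 : pvGood a L1) (g2 : pvGood a L2) : L1 = L2 := by
  rcases Nat.lt_trichotomy L1 L2 with h | h | h
  · exact absurd (pvGood_unique_lt a h g1 g2) not_false
  · exact h
  · exact absurd (pvGood_unique_lt a h g2 g1) not_false

theorem pvGetD_set_self (m : List Int) (i : Nat) (v : Int) (h : i < m.length) :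
    (m.set i v).getD i 0 = v := by
  simp [List.getD, h]

theorem pvGetD_set_ne (m : List Int) (i j : Nat) (v : Int) (h : i ≠ j) :
    (m.set i v).getD j 0 = m.getD j 0 := by
  simp [List.getD, h]

theorem pvSM_lt_iff (a : List Int) (c : Int) :
    ∀ fuel i, i + fuel + 1 = a.length →
      (c < pvSM a i fuel ↔ ∀ j, i ≤ j → j < a.length → c < a.getD j 0) := by
  intro fuel
  induction fuel with
  | zero =>
    intro i hi
    constructor
    · intro h j hj1 hj2
      have : j = i := by omega
      subst this; exact h
    · intro h
      exact h i le_rfl (by omega)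
  | succ fuel ih =>
    intro i hi
    simp only [pvSM, lt_min_iff]
    rw [ih (i+1) (by omega)]
    constructor
    · rintro ⟨h1, h2⟩ j hj1 hj2
      rcases Nat.lt_or_ge i j with h' | h'
      · exact h2 j h' hj2
      · have : j = i := by omega
        subst this; exact h1
    · intro h
      exact ⟨h i le_rfl (by omega), fun j hj1 hj2 => h j (by omega) hj2⟩

theorem pvBuildMax_spec (a : List Int) :
    ∀ fuel m i, m.length = a.length → 1 ≤ i → i + fuel = a.length →
      (∀ j, j < i → m.getD j 0 = pvPM a j) →
      (∀ j, i ≤ j → m.getD j 0 = a.getD j 0) →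
      ∀ j, j < a.length → (pvBuildMax a m i fuel).getD j 0 = pvPM a j := by
  intro fuel
  induction fuel with
  | zero =>
    intro m i _ _ hi h1 _ j hj
    exact h1 j (by omega)
  | succ fuel ih =>
    intro m i hlen hi1 hi h1 h2 j hj
    simp only [pvBuildMax]
    apply ih _ (i+1) (by simp [hlen]) (by omega) (by omega)
    · intro j hj'
      rcases Nat.lt_or_ge j i with h' | h'
      · rw [pvGetD_set_ne _ _ _ _ (by omega)]; exact h1 j h'
      · have hji : j = i := by omega
        rw [hji]
        rw [pvGetD_set_self _ _ _ (by omega)]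
        have : i - 1 < i := by omega
        rw [h1 (i-1) this]
        have hieq : i = (i-1)+1 := by omega
        rw [hieq]
        simp [pvPM]
    · intro j hj'
      rw [pvGetD_set_ne _ _ _ _ (by omega)]
      exact h2 j (by omega)
    · exact hj

theorem pvBuildMin_spec (a : List Int) :
    ∀ k m, m.length = a.length → k < a.length →
      (∀ j, j < k → m.getD j 0 = a.getD j 0) →
      (∀ j, k ≤ j → j < a.length → m.getD j 0 = pvSM a j (a.length - 1 - j)) →
      ∀ j, j < a.length → (pvBuildMin a m k).getD j 0 = pvSM a j (a.length - 1 - j) := by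
  intro k
  induction k with
  | zero =>
    intro m _ _ _ h2 j hj
    exact h2 j (by omega) hj
  | succ k ih =>
    intro m hlen hk h1 h2 j hj
    simp only [pvBuildMin]
    apply ih _ (by simp [hlen]) (by omega)
    · intro j hj'
      rw [pvGetD_set_ne _ _ _ _ (by omega)]
      exact h1 j (by omega)
    · intro j hj1 hj2
      rcases Nat.lt_or_ge j (k+1) with h' | h'
      · have hjk : j = k := by omega
        rw [hjk]
        rw [pvGetD_set_self _ _ _ (by omega)]
        rw [h2 (k+1) le_rfl (by omega)]
        have hs : a.length - 1 - k = (a.length - 1 - (k+1)) + 1 := by omega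
        rw [hs]
        rfl
      · rw [pvGetD_set_ne _ _ _ _ (by omega)]
        exact h2 j h' hj2
    · exact hj

theorem pvScan_good (a mx mn : List Int)
    (hmx : ∀ j, j < a.length → mx.getD j 0 = pvPM a j)
    (hmn : ∀ j, j < a.length → mn.getD j 0 = pvSM a j (a.length - 1 - j)) :
    ∀ fuel i, 1 ≤ a.length → i + fuel + 1 = a.length →
      (∀ k, 1 ≤ k → k ≤ i → ∃ j, k ≤ j ∧ j < a.length ∧ a.getD j 0 ≤ pvPM a (k-1)) →
      ∃ R : Nat, pvScan mx mn i ((a.length : Nat) : Int) fuel = (R : Int) ∧ pvGood a R := by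
  intro fuel
  induction fuel with
  | zero =>
    intro i h1 hi hmin
    refine ⟨a.length, rfl, h1, le_rfl, ?_, ?_⟩
    · intro j hj1 hj2; omega
    · intro k hk1 hk2; exact hmin k hk1 (by omega)
  | succ fuel ih =>
    intro i h1 hi hmin
    simp only [pvScan]
    have hin : i < a.length := by omega
    have hin1 : i + 1 < a.length := by omega
    rw [hmx i hin, hmn (i+1) hin1]
    by_cases hc : pvPM a i < pvSM a (i+1) (a.length - 1 - (i+1))
    · rw [if_pos hc]
      refine ⟨i+1, by push_cast; ring, by omega, by omega, ?_, ?_⟩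
      · intro j hj1 hj2
        have := (pvSM_lt_iff a (pvPM a i) (a.length - 1 - (i+1)) (i+1) (by omega)).mp hc
        simpa using this j hj1 hj2
      · intro k hk1 hk2
        exact hmin k hk1 (by omega)
    · rw [if_neg hc]
      apply ih (i+1) h1 (by omega)
      intro k hk1 hk2
      rcases Nat.lt_or_ge k (i+1) with h' | h'
      · exact hmin k hk1 (by omega)
      · have hki : k = i+1 := by omega
        subst hki
        rw [pvSM_lt_iff a (pvPM a i) (a.length - 1 - (i+1)) (i+1) (by omega)] at hc
        push Not at hc
        obtain ⟨j, hj1, hj2, hj3⟩ := hc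
        exact ⟨j, hj1, hj2, by simpa using hj3⟩

theorem pvGo_good (a : List Int) :
    ∀ fuel i L, 1 ≤ L → L ≤ i → i + fuel = a.length →
      (∀ j, L ≤ j → j < i → pvPM a (L-1) < a.getD j 0) →
      (∀ k, 1 ≤ k → k < L → ∃ j, k ≤ j ∧ j < i ∧ a.getD j 0 ≤ pvPM a (k-1)) →
      ∃ R : Nat, pvGo a (pvPM a (L-1)) (pvPM a (i-1)) ((L : Nat) : Int) i fuel = (R : Int) ∧ pvGood a R := by
  intro fuel
  induction fuel with
  | zero =>
    intro i L hL1 hLi hi hv hmin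
    refine ⟨L, rfl, hL1, by omega, ?_, ?_⟩
    · intro j hj1 hj2; exact hv j hj1 (by omega)
    · intro k hk1 hk2
      obtain ⟨j, h1, h2, h3⟩ := hmin k hk1 hk2
      exact ⟨j, h1, by omega, h3⟩
  | succ fuel ih =>
    intro i L hL1 hLi hi hv hmin
    simp only [pvGo]
    have hi1 : 1 ≤ i := by omega
    have hc : max (pvPM a (i-1)) (a.getD i 0) = pvPM a i := by
      have : i = (i-1)+1 := by omega
      rw [this]
      simp [pvPM, max_comm]
    by_cases hx : a.getD i 0 ≤ pvPM a (L-1)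
    · rw [if_pos hx, hc]
      have hpm : pvPM a i = pvPM a ((i+1)-1) := by norm_num
      have hcast : ((i : Nat) : Int) + 1 = (((i+1 : Nat)) : Int) := by push_cast; ring
      rw [hpm, hcast]
      apply ih (i+1) (i+1) (by omega) le_rfl (by omega)
      · intro j hj1 hj2; omega
      · intro k hk1 hk2
        rcases Nat.lt_or_ge k L with h' | h'
        · obtain ⟨j, h1, h2, h3⟩ := hmin k hk1 h'
          exact ⟨j, h1, by omega, h3⟩
        · refine ⟨i, by omega, by omega, ?_⟩
          exact le_trans hx (pvPM_mono a (by omega))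
    · rw [if_neg hx, hc]
      have hpm : pvPM a i = pvPM a ((i+1)-1) := by norm_num
      rw [hpm]
      apply ih (i+1) L hL1 (by omega) (by omega)
      · intro j hj1 hj2
        rcases Nat.lt_or_ge j i with h' | h'
        · exact hv j hj1 h'
        · have : j = i := by omega
          subst this
          exact lt_of_not_ge (fun h => hx h)
      · intro k hk1 hk2
        obtain ⟨j, h1, h2, h3⟩ := hmin k hk1 hk2
        exact ⟨j, h1, by omega, h3⟩

theorem solution_eq_alt (a : List Int) : solution a = solution_alt a := by
  by_cases hnil : a = []
  · subst hnil; rfl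
  · have hn : 1 ≤ a.length := by
      cases a with
      | nil => exact absurd rfl hnil
      | cons x xs => simp
    have hmx : ∀ j, j < a.length → (pvBuildMax a a 1 (a.length - 1)).getD j 0 = pvPM a j := by
      apply pvBuildMax_spec a (a.length - 1) a 1 rfl le_rfl (by omega)
      · intro j hj
        have : j = 0 := by omega
        subst this; rfl
      · intro j _; rfl
    have hmn : ∀ j, j < a.length → (pvBuildMin a a (a.length - 1)).getD j 0 = pvSM a j (a.length - 1 - j) := by
      apply pvBuildMin_spec a (a.length - 1) a rfl (by omega)
      · intro j _; rfl
      · intro j hj1 hj2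
        have : j = a.length - 1 := by omega
        subst this
        have : a.length - 1 - (a.length - 1) = 0 := by omega
        rw [this]
        rfl
    obtain ⟨RA, hRA, gA⟩ := pvScan_good a _ _ hmx hmn (a.length - 1) 0 hn (by omega)
      (by intro k hk1 hk2; omega)
    have h0 : a.getD 0 0 = pvPM a 0 := rfl
    obtain ⟨RB, hRB, gB⟩ := pvGo_good a (a.length - 1) 1 1 le_rfl le_rfl (by omega)
      (by intro j hj1 hj2; omega)
      (by intro k hk1 hk2; omega)
    have hAB : RA = RB := pvGood_unique a gA gB
    show pvScan (pvBuildMax a a 1 (a.length-1)) (pvBuildMin a a (a.length-1)) 0 ((a.length : Nat) : Int) (a.length - 1) = solution_alt a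
    rw [hRA, hAB]
    simp only [solution_alt, if_neg hnil]
    rw [h0]
    have : pvPM a 0 = pvPM a (1-1) := rfl
    rw [this] at hRB ⊢
    exact hRB.symm

-- ===== VERDICT (by name: the statement is the Claim_ definition above) =====
theorem solution_spec : Claim_equal_solution := by
  intro a _
  exact solution_eq_alt a
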